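-- pv_equiv track=rewrite | github.com/justpy-org/justpy | test/regex_json.py | create_dict_for_colons
-- ===== SOURCE A (Python) =====
-- def create_dict_for_colons(s):
--     d = {}
--     handle_flag = True
--     for i, c in enumerate(s):
--         if c==':':
--             d[i] = handle_flag
--         elif c=='"':
--             handle_flag = not handle_flag
--     return d
-- ===== SOURCE B (Python) =====
-- import bisect
--
-- def create_dict_for_colons(s):
--     # flag at a colon = "even number of quotes strictly before it":
--     # index the quote positions once, then look each colon up with bisect.
--     quote_positions = [j for j, c in enumerate(s) if c == '"']
--     return {i: bisect.bisect_left(quote_positions, i) % 2 == 0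
--             for i, c in enumerate(s) if c == ':'}
-- ===== Notes on version B (the rewrite author's own statement) =====
-- stated objective: alternative
-- what changed: Replaces the single stateful quote-toggle pass with an index-then-lookup decomposition: build the sorted list of quote positions once, then map each colon position to the parity of its bisect_left rank in that index.
import Mathlib
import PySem

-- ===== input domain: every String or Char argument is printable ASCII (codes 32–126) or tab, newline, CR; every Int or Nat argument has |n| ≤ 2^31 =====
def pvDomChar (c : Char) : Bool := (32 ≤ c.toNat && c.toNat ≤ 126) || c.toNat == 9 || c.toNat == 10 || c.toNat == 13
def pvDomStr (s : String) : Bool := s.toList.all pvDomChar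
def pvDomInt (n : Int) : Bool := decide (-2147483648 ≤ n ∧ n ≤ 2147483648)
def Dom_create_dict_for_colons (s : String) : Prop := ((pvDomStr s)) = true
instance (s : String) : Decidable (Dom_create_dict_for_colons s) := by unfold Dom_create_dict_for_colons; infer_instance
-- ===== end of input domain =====

-- B replaces A's single stateful quote-toggle pass by an index-then-lookup decomposition
-- (quote-position index + bisect per colon); an 'alternative' with the same exact return value.

-- ===== PORT A =====
-- A's loop body: dict + toggle flag, one step per (index, char) of enumerate(s).
def pvStepA (st : PySem.Dict Int Bool × Bool) (ic : Int × Char) : PySem.Dict Int Bool × Bool :=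
  if ic.2 = ':' then (st.1.insert ic.1 st.2, st.2)
  else if ic.2 = '"' then (st.1, !st.2)
  else st

def create_dict_for_colons (s : String) : List (Int × Bool) :=
  ((PySem.List.enumerate s.toList).foldl pvStepA (PySem.Dict.empty, true)).1.items

-- ===== PORT B =====
-- Source B's dict comprehension has pairwise-distinct keys (enumerate indices), so it is a map.
def create_dict_for_colons_alt (s : String) : List (Int × Bool) :=
  let quote_positions : List Int :=
    ((PySem.List.enumerate s.toList).filter (fun q => q.2 == '"')).map (fun q => q.1)
  ((PySem.List.enumerate s.toList).filter (fun p => p.2 == ':')).map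
    (fun p => (p.1, decide ((PySem.List.bisectLeft quote_positions p.1) % 2 = 0)))

-- ===== PRECONDITION & SPEC =====
def Spec_create_dict_for_colons (s : String) (out : List (Int × Bool)) : Prop := out = create_dict_for_colons_alt s
instance (s : String) (out : List (Int × Bool)) : Decidable (Spec_create_dict_for_colons s out) := by unfold Spec_create_dict_for_colons; infer_instance

-- ===== CLAIM (what is proved, stated in full; the proofs are below) =====
def Claim_equal_create_dict_for_colons : Prop := ∀ (s : String), Dom_create_dict_for_colons s → Spec_create_dict_for_colons s (create_dict_for_colons s)

-- ===== LEMMAS AND PROOFS =====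

-- reference description of the output: one pass, toggle flag, emit (index, flag) at colons
def pvGo (l : List Char) (k : Int) (f : Bool) : List (Int × Bool) :=
  match l with
  | [] => []
  | c :: t =>
    if c = ':' then (k, f) :: pvGo t (k + 1) f
    else if c = '"' then pvGo t (k + 1) (!f)
    else pvGo t (k + 1) f

theorem pv_loopA_items (l : List Char) : ∀ (k : Int) (d : PySem.Dict Int Bool) (f : Bool),
    (∀ p ∈ d.items, p.1 < k) →
    ((PySem.List.enumerate l k).foldl pvStepA (d, f)).1.items = d.items ++ pvGo l k f := by
  induction l with
  | nil => intro k d f h; simp [PySem.List.enumerate_nil, pvGo]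
  | cons c t ih =>
    intro k d f h
    rw [PySem.List.enumerate_cons]
    simp only [List.foldl_cons]
    by_cases hc : c = ':'
    · have hnc : (d.contains k) = false := by
        rw [PySem.Dict.contains_eq_decide_mem_keys]
        simp only [decide_eq_false_iff_not, PySem.Dict.keys, List.mem_map]
        rintro ⟨p, hp, hpk⟩
        exact absurd (hpk ▸ h p hp) (lt_irrefl k)
      have hitems := PySem.Dict.items_insert_of_not_contains d f hnc
      rw [show pvStepA (d, f) (k, c) = (d.insert k f, f) by simp [pvStepA, hc]]
      rw [ih (k+1) (d.insert k f) f (by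
        intro p hp
        rw [hitems] at hp
        rcases List.mem_append.1 hp with h1 | h1
        · exact lt_trans (h p h1) (by omega)
        · rw [List.mem_singleton] at h1
          subst h1; omega)]
      rw [hitems, pvGo, if_pos hc, List.append_assoc]
      simp
    · by_cases hq : c = '"'
      · rw [show pvStepA (d, f) (k, c) = (d, !f) by simp [pvStepA, hq]]
        rw [ih (k+1) d (!f) (fun p hp => lt_trans (h p hp) (by omega))]
        rw [pvGo, if_neg hc, if_pos hq]
      · rw [show pvStepA (d, f) (k, c) = (d, f) by simp [pvStepA, hc, hq]]
        rw [ih (k+1) d f (fun p hp => lt_trans (h p hp) (by omega))]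
        simp [pvGo, hc, hq]

theorem pv_bisectLeft_eq_countP (xs : List Int) (x : Int) (h : xs.Pairwise (· ≤ ·)) :
    PySem.List.bisectLeft xs x = xs.countP (fun y => decide (y < x)) := by
  obtain ⟨hb, hlt, hge⟩ := PySem.List.bisectLeft_spec xs x h
  set b := PySem.List.bisectLeft xs x with hbdef
  have hsplit : xs = xs.take b ++ xs.drop b := (List.take_append_drop b xs).symm
  rw [hsplit, List.countP_append]
  have h1 : (xs.take b).countP (fun y => decide (y < x)) = (xs.take b).length := by
    apply List.countP_eq_length.2
    intro y hy
    obtain ⟨i, hi, hiy⟩ := List.getElem_of_mem hy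
    rw [List.getElem_take] at hiy
    simp only [List.length_take] at hi
    exact decide_eq_true (hiy ▸ hlt i (lt_min_iff.1 hi).2 (lt_min_iff.1 hi).1)
  have h2 : (xs.drop b).countP (fun y => decide (y < x)) = 0 := by
    apply List.countP_eq_zero.2
    intro y hy
    obtain ⟨i, hi, hiy⟩ := List.getElem_of_mem hy
    rw [List.getElem_drop] at hiy
    simp only [List.length_drop] at hi
    have := hge (b + i) (by omega) (by omega)
    simp [← hiy, not_lt.2 this]
  rw [h1, h2, List.length_take]
  omega

theorem pv_quotes_ge (l : List Char) : ∀ (k : Int),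
    ∀ y ∈ ((PySem.List.enumerate l k).filter (fun q => q.2 == '"')).map (fun q => q.1), k ≤ y := by
  induction l with
  | nil => intro k y hy; simp [PySem.List.enumerate_nil] at hy
  | cons c t ih =>
    intro k y hy
    rw [PySem.List.enumerate_cons] at hy
    by_cases hq : c = '"'
    · rw [List.filter_cons_of_pos (by simp [hq])] at hy
      rcases List.mem_map.1 hy with ⟨p, hp, rfl⟩
      rcases List.mem_cons.1 hp with rfl | hp
      · exact le_refl _
      · exact le_trans (by omega) (ih (k+1) p.1 (List.mem_map_of_mem hp))
    · rw [List.filter_cons_of_neg (by simp [hq])] at hy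
      exact le_trans (by omega) (ih (k+1) y hy)

theorem pv_parity_flip (n : Nat) : decide ((n + 1) % 2 = 0) = !decide (n % 2 = 0) := by
  rw [← decide_not]
  exact decide_eq_decide.2 (by omega)

theorem pv_go_eq (l : List Char) : ∀ (k : Int) (qpre : List Int), (∀ y ∈ qpre, y < k) →
    ((PySem.List.enumerate l k).filter (fun p => p.2 == ':')).map
        (fun p => (p.1, decide (((qpre ++ ((PySem.List.enumerate l k).filter (fun q => q.2 == '"')).map (fun q => q.1)).countP (fun y => decide (y < p.1))) % 2 = 0)))
      = pvGo l k (decide (qpre.length % 2 = 0)) := by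
  induction l with
  | nil => intro k qpre h; simp [PySem.List.enumerate_nil, pvGo]
  | cons c t ih =>
    intro k qpre h
    rw [PySem.List.enumerate_cons]
    by_cases hc : c = ':'
    · have hb1 : ((fun p : Int × Char => p.2 == ':') (k, c)) = true := by simp [hc]
      have hb2 : ¬ ((fun q : Int × Char => q.2 == '"') (k, c)) = true := by simp [hc]
      rw [List.filter_cons_of_pos (p := fun p : Int × Char => p.2 == ':') (a := (k, c)) (l := PySem.List.enumerate t (k+1)) hb1, List.filter_cons_of_neg (p := fun q : Int × Char => q.2 == '"') (a := (k, c)) (l := PySem.List.enumerate t (k+1)) hb2, List.map_cons]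
      rw [pvGo, if_pos hc]
      have hcount : ((qpre ++ ((PySem.List.enumerate t (k+1)).filter (fun q => q.2 == '"')).map (fun q => q.1)).countP (fun y => decide (y < (k, c).1))) = qpre.length := by
        rw [List.countP_append]
        have h1 : qpre.countP (fun y => decide (y < k)) = qpre.length :=
          List.countP_eq_length.2 (fun y hy => decide_eq_true (h y hy))
        have h2 : (((PySem.List.enumerate t (k+1)).filter (fun q => q.2 == '"')).map (fun q => q.1)).countP (fun y => decide (y < k)) = 0 :=
          List.countP_eq_zero.2 (fun y hy => by
            have hky := pv_quotes_ge t (k+1) y hy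
            simp only [decide_eq_true_eq]
            omega)
        simp only [h1, h2, Nat.add_zero]
      rw [hcount]
      exact congrArg _ (ih (k+1) qpre (fun y hy => lt_trans (h y hy) (by omega)))
    · by_cases hq : c = '"'
      · have hb1 : ¬ ((fun p : Int × Char => p.2 == ':') (k, c)) = true := by simp [hq]
        have hb2 : ((fun q : Int × Char => q.2 == '"') (k, c)) = true := by simp [hq]
        rw [List.filter_cons_of_neg (p := fun p : Int × Char => p.2 == ':') (a := (k, c)) (l := PySem.List.enumerate t (k+1)) hb1, List.filter_cons_of_pos (p := fun q : Int × Char => q.2 == '"') (a := (k, c)) (l := PySem.List.enumerate t (k+1)) hb2, List.map_cons]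
        rw [pvGo, if_neg hc, if_pos hq]
        have hih := ih (k+1) (qpre ++ [k]) (by
          intro y hy
          rcases List.mem_append.1 hy with h1 | h1
          · exact lt_trans (h y h1) (by omega)
          · rw [List.mem_singleton] at h1; omega)
        rw [List.length_append, List.length_singleton, pv_parity_flip qpre.length] at hih
        simp only [List.append_assoc, List.cons_append, List.nil_append] at hih
        exact hih
      · have hb1 : ¬ ((fun p : Int × Char => p.2 == ':') (k, c)) = true := by simp [hc]
        have hb2 : ¬ ((fun q : Int × Char => q.2 == '"') (k, c)) = true := by simp [hq]
        rw [List.filter_cons_of_neg (p := fun p : Int × Char => p.2 == ':') (a := (k, c)) (l := PySem.List.enumerate t (k+1)) hb1, List.filter_cons_of_neg (p := fun q : Int × Char => q.2 == '"') (a := (k, c)) (l := PySem.List.enumerate t (k+1)) hb2]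
        rw [pvGo, if_neg hc, if_neg hq]
        exact ih (k+1) qpre (fun y hy => lt_trans (h y hy) (by omega))

theorem pv_quotes_sorted (l : List Char) :
    (((PySem.List.enumerate l 0).filter (fun q => q.2 == '"')).map (fun q => q.1)).Pairwise (· ≤ ·) := by
  have h0 : ((PySem.List.enumerate l 0).map (fun q : Int × Char => q.1)).Pairwise (· < ·) := by
    rw [show (PySem.List.enumerate l 0).map (fun q : Int × Char => q.1) = (PySem.List.enumerate l 0).map (·.1) from rfl]
    rw [PySem.List.map_fst_enumerate]
    exact PySem.List.pairwise_lt_pyRange_one 0 (0 + l.length)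
  have hsub : (((PySem.List.enumerate l 0).filter (fun q => q.2 == '"')).map (fun q : Int × Char => q.1)).Sublist ((PySem.List.enumerate l 0).map (fun q : Int × Char => q.1)) :=
    List.Sublist.map _ List.filter_sublist
  exact (h0.sublist hsub).imp le_of_lt

-- ===== VERDICT (by name: the statement is the Claim_ definition above) =====
theorem create_dict_for_colons_spec : Claim_equal_create_dict_for_colons := by
  intro s _
  unfold Spec_create_dict_for_colons create_dict_for_colons create_dict_for_colons_alt
  rw [pv_loopA_items s.toList 0 PySem.Dict.empty true (by intro p hp; simp [PySem.Dict.empty] at hp)]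
  have hmap :
      ((PySem.List.enumerate s.toList).filter (fun p => p.2 == ':')).map
        (fun p => (p.1, decide ((PySem.List.bisectLeft (((PySem.List.enumerate s.toList).filter (fun q => q.2 == '"')).map (fun q => q.1)) p.1) % 2 = 0)))
      = ((PySem.List.enumerate s.toList).filter (fun p => p.2 == ':')).map
        (fun p => (p.1, decide (((([] : List Int) ++ ((PySem.List.enumerate s.toList).filter (fun q => q.2 == '"')).map (fun q => q.1)).countP (fun y => decide (y < p.1))) % 2 = 0))) := by
    apply List.map_congr_left
    intro p _
    rw [pv_bisectLeft_eq_countP _ p.1 (pv_quotes_sorted s.toList), List.nil_append]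
  rw [hmap, pv_go_eq s.toList 0 [] (by intro y hy; simp at hy)]
  simp [PySem.Dict.empty]
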